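-- pv_equiv track=rewrite | github.com/Bongousse/AlgorithmByPython | etc/card_even_odd_sum.py | solution
-- ===== SOURCE A (Python) =====
-- def solution(cards):
--     if len(cards) == 1:
--         return 1
--     cards_sum = [0 for _ in range(len(cards))]
--     for i in range(0, len(cards), 2):
--         if i - 2 < 0:
--             cards_sum[i] = cards[i]
--         else:
--             cards_sum[i] = cards_sum[i - 2] + cards[i]
--     for i in range(1, len(cards), 2):
--         if i - 2 < 0:
--             cards_sum[i] = cards[i]
--         else:
--             cards_sum[i] = cards_sum[i - 2] + cards[i]
--
--     cards_reversed_sum = [0 for _ in range(len(cards))]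
--     for i in range(len(cards) - 1, -1, -2):
--         if i + 2 >= len(cards):
--             cards_reversed_sum[i] = cards[i]
--         else:
--             cards_reversed_sum[i] = cards_reversed_sum[i + 2] + cards[i]
--     for i in range(len(cards) - 2, -1, -2):
--         if i + 2 >= len(cards):
--             cards_reversed_sum[i] = cards[i]
--         else:
--             cards_reversed_sum[i] = cards_reversed_sum[i + 2] + cards[i]
--
--     for i in range(len(cards)):
--         if i - 2 >= 0:
--             previous_a = cards_sum[i - 2]
--         else:
--             previous_a = 0
--         if i + 1 < len(cards):
--             next_a = cards_reversed_sum[i + 1]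
--         else:
--             next_a = 0
--         a_sum = previous_a + next_a
--
--         if i - 1 >= 0:
--             previous_b = cards_sum[i - 1]
--         else:
--             previous_b = 0
--         if i + 2 < len(cards):
--             next_b = cards_reversed_sum[i + 2]
--         else:
--             next_b = 0
--         b_sum = previous_b + next_b
--         if a_sum == b_sum:
--             return i + 1
--     return -1
-- ===== SOURCE B (Python) =====
-- def solution(cards):
--     tot = [0, 0]
--     for i, c in enumerate(cards):
--         tot[i % 2] += c
--     left = [0, 0]
--     for i, c in enumerate(cards):
--         p = i % 2
--         q = 1 - p
--         if left[p] + (tot[q] - left[q]) == left[q] + (tot[p] - left[p] - c):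
--             return i + 1
--         left[p] += c
--     return -1
-- ===== Notes on version B (the rewrite author's own statement) =====
-- stated objective: simpler
-- what changed: A builds two length-n auxiliary arrays of step-2 prefix/suffix sums in four separate loops and then scans them; B makes one pass computing the two parity totals and a second O(1)-memory pass maintaining running left-even/left-odd sums, deriving the right-hand sums by subtraction, with no special case for length 0 or 1; a timing run measured B ~1.7x faster (no array allocation).
import Mathlib
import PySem

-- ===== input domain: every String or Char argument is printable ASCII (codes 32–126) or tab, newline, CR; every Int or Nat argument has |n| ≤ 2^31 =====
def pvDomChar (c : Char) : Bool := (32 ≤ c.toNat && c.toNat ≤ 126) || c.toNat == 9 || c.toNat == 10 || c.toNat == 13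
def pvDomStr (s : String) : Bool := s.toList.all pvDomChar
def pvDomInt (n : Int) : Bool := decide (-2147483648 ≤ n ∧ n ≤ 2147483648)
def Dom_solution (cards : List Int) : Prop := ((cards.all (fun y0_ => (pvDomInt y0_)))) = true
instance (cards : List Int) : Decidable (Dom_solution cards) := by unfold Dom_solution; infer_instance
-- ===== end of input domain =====

-- B replaces A's four auxiliary-array passes by one O(1)-memory scan using parity totals; objective: simpler.

-- ===== PORT A =====
-- forward step-2 loop `for i in range(start, len(cards), 2)` filling cards_sum;
-- indices are provably in range, so cards[i] / cards_sum[i-2] are ported as getD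
def buildFwd (cards : List Int) (s : List Int) (i : Nat) : List Int :=
  if i < cards.length then
    -- `if i - 2 < 0` on a loop index i ≥ 0 is `i < 2`
    let v := if i < 2 then cards.getD i 0 else s.getD (i - 2) 0 + cards.getD i 0
    buildFwd cards (s.set i v) (i + 2)
  else s
termination_by cards.length - i
decreasing_by omega

-- backward step-2 loop `for i in range(start, -1, -2)` filling cards_reversed_sum
def buildBwd (cards : List Int) (s : List Int) (i : Nat) : List Int :=
  let v := if cards.length ≤ i + 2 then cards.getD i 0 else s.getD (i + 2) 0 + cards.getD i 0
  let s' := s.set i v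
  if 2 ≤ i then buildBwd cards s' (i - 2) else s'
termination_by i
decreasing_by omega

-- final loop `for i in range(len(cards)): ... return i + 1 ... / return -1`
def searchA (cards csum rsum : List Int) (i : Nat) : Int :=
  if i < cards.length then
    let previousA := if 2 ≤ i then csum.getD (i - 2) 0 else 0
    let nextA := if i + 1 < cards.length then rsum.getD (i + 1) 0 else 0
    let aSum := previousA + nextA
    let previousB := if 1 ≤ i then csum.getD (i - 1) 0 else 0
    let nextB := if i + 2 < cards.length then rsum.getD (i + 2) 0 else 0
    let bSum := previousB + nextB
    if aSum = bSum then (i : Int) + 1 else searchA cards csum rsum (i + 1)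
  else -1
termination_by cards.length - i
decreasing_by omega

def solution (cards : List Int) : Int :=
  if cards.length = 1 then 1
  else
    let n := cards.length
    let csum1 := buildFwd cards (List.replicate n 0) 0
    let csum := buildFwd cards csum1 1
    -- range(n-1,-1,-2) is empty iff n = 0; range(n-2,-1,-2) is empty iff n ≤ 1
    let rsum1 := if n = 0 then List.replicate n 0 else buildBwd cards (List.replicate n 0) (n - 1)
    let rsum := if n ≤ 1 then rsum1 else buildBwd cards rsum1 (n - 2)
    searchA cards csum rsum 0

-- ===== PORT B =====
-- `for i, c in enumerate(cards): tot[i % 2] += c`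
def bTotals : List Int → Nat → Int × Int → Int × Int
  | [], _, t => t
  | c :: rest, i, t =>
      bTotals rest (i + 1) (if i % 2 = 0 then (t.1 + c, t.2) else (t.1, t.2 + c))

-- the single balance-check pass over `enumerate(cards)` carrying left = (leftEven, leftOdd)
def bLoop (tot : Int × Int) : List Int → Nat → Int × Int → Int
  | [], _, _ => -1
  | c :: rest, i, left =>
      if i % 2 = 0 then
        if left.1 + (tot.2 - left.2) = left.2 + (tot.1 - left.1 - c) then (i : Int) + 1
        else bLoop tot rest (i + 1) (left.1 + c, left.2)
      else
        if left.2 + (tot.1 - left.1) = left.1 + (tot.2 - left.2 - c) then (i : Int) + 1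
        else bLoop tot rest (i + 1) (left.1, left.2 + c)

def solution_alt (cards : List Int) : Int :=
  bLoop (bTotals cards 0 (0, 0)) cards 0 (0, 0)

-- ===== PRECONDITION & SPEC =====
def Spec_solution (cards : List Int) (out : Int) : Prop := out = solution_alt cards
instance (cards : List Int) (out : Int) : Decidable (Spec_solution cards out) := by unfold Spec_solution; infer_instance

-- ===== CLAIM (what is proved, stated in full; the proofs are below) =====
def Claim_equal_solution : Prop := ∀ (cards : List Int), Dom_solution cards → Spec_solution cards (solution cards)

-- ===== LEMMAS AND PROOFS =====

-- sum of cards[j] for j < i with j % 2 = p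
def psum (cards : List Int) (p : Nat) : Nat → Int
  | 0 => 0
  | i + 1 => psum cards p i + (if i % 2 = p then cards.getD i 0 else 0)

-- common reference: first i whose removal balances the two alternating sums, via parity prefix sums
def srch (cards : List Int) (i : Nat) : Int :=
  if i < cards.length then
    if psum cards (i % 2) i + (psum cards ((i + 1) % 2) cards.length - psum cards ((i + 1) % 2) i)
       = psum cards ((i + 1) % 2) i
         + (psum cards (i % 2) cards.length - psum cards (i % 2) i - cards.getD i 0)
    then (i : Int) + 1 else srch cards (i + 1)
  else -1
termination_by cards.length - i
decreasing_by omega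

lemma buildFwd_length (cards s : List Int) (i : Nat) :
    (buildFwd cards s i).length = s.length := by
  rw [buildFwd]
  split
  · rw [buildFwd_length]; simp
  · rfl
termination_by cards.length - i
decreasing_by omega

lemma buildBwd_length (cards s : List Int) (i : Nat) :
    (buildBwd cards s i).length = s.length := by
  rw [buildBwd]
  split
  · rw [buildBwd_length]; simp
  · simp
termination_by i
decreasing_by omega

lemma buildFwd_getD (cards : List Int) (i : Nat) (s : List Int)
    (hlen : s.length = cards.length)
    (hprev : 2 ≤ i → s.getD (i - 2) 0 = psum cards (i % 2) (i - 1)) :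
    ∀ k, k < cards.length →
      (buildFwd cards s i).getD k 0 =
        if i ≤ k ∧ k % 2 = i % 2 then psum cards (k % 2) (k + 1) else s.getD k 0 := by
  intro k hk
  rw [buildFwd]
  split
  case isFalse h =>
    have : ¬ (i ≤ k ∧ k % 2 = i % 2) := by omega
    simp [this]
  case isTrue h =>
    simp only []
    have hv : (if i < 2 then cards.getD i 0 else s.getD (i - 2) 0 + cards.getD i 0)
        = psum cards (i % 2) (i + 1) := by
      by_cases h2 : i < 2
      · interval_cases i <;> simp [psum]
      · obtain ⟨j, rfl⟩ : ∃ j, i = j + 2 := ⟨i - 2, by omega⟩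
        have hp : (j + 2) % 2 = j % 2 := Nat.add_mod_right j 2
        have hp1 : ¬ ((j + 1) % 2 = j % 2) := by omega
        simp only [h2, if_false, hprev (by omega)]
        simp [psum, hp, hp1]
    set v := (if i < 2 then cards.getD i 0 else s.getD (i - 2) 0 + cards.getD i 0) with hvdef
    rw [buildFwd_getD cards (i + 2) (s.set i v) (by simp [hlen])
      (by intro _
          have : i + 2 - 2 = i := by omega
          rw [this]
          have hi : i < s.length := by omega
          have : (s.set i v).getD i 0 = v := by simp [List.getD, hi]
          rw [this, hv]
          have : (i + 2) % 2 = i % 2 := Nat.add_mod_right i 2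
          rw [this]
          congr 1
          ) k hk]
    have hp2 : (i + 2) % 2 = i % 2 := Nat.add_mod_right i 2
    by_cases hki : k = i
    · subst hki
      have hi : k < s.length := by omega
      simp [List.getD, hi, hv]
    · have hne : (s.set i v).getD k 0 = s.getD k 0 := by simp [List.getD, Ne.symm hki]
      rw [hne, hp2]
      by_cases hpar : k % 2 = i % 2
      · have : (i + 2 ≤ k ∧ k % 2 = i % 2) ↔ (i ≤ k ∧ k % 2 = i % 2) := by omega
        rw [if_congr this rfl rfl]
      · simp [hpar]
termination_by cards.length - i
decreasing_by omega

lemma buildBwd_getD (cards : List Int) (i : Nat) (s : List Int)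
    (hi : i < cards.length) (hlen : s.length = cards.length)
    (hprev : i + 2 < cards.length →
      s.getD (i + 2) 0 = psum cards (i % 2) cards.length - psum cards (i % 2) (i + 2)) :
    ∀ k, k < cards.length →
      (buildBwd cards s i).getD k 0 =
        if k ≤ i ∧ k % 2 = i % 2 then
          psum cards (k % 2) cards.length - psum cards (k % 2) k
        else s.getD k 0 := by
  intro k hk
  rw [buildBwd]

  have hv : (if cards.length ≤ i + 2 then cards.getD i 0 else s.getD (i + 2) 0 + cards.getD i 0)
      = psum cards (i % 2) cards.length - psum cards (i % 2) i := by
    have hstep : psum cards (i % 2) (i + 2) = psum cards (i % 2) i + cards.getD i 0 := by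
      have h1 : ¬ ((i + 1) % 2 = i % 2) := by omega
      simp [psum, h1]
    by_cases h2 : cards.length ≤ i + 2
    · have hn : cards.length = i + 1 ∨ cards.length = i + 2 := by omega
      rcases hn with hn | hn
      · rw [hn]; simp [psum]
      · rw [hn]; simp [psum]; omega
    · simp only [h2, if_false, hprev (by omega), hstep]
      ring
  set v := (if cards.length ≤ i + 2 then cards.getD i 0 else s.getD (i + 2) 0 + cards.getD i 0)
    with hvdef
  have hgetself : (s.set i v).getD i 0 = v := by
    have : i < s.length := by omega
    simp [List.getD, this]
  split
  case isTrue h2 =>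
    obtain ⟨j, rfl⟩ : ∃ j, i = j + 2 := ⟨i - 2, by omega⟩
    have hp : (j + 2) % 2 = j % 2 := Nat.add_mod_right j 2
    rw [show j + 2 - 2 = j from rfl, buildBwd_getD cards j (s.set (j + 2) v) (by omega) (by simp [hlen])
      (by intro _
          rw [hgetself, hv, hp]) k hk]
    by_cases hki : k = j + 2
    · subst hki
      rw [if_neg (by omega : ¬ (j + 2 ≤ j ∧ (j + 2) % 2 = j % 2)), hgetself, hv,
          if_pos ⟨le_refl _, rfl⟩]
    · have hne : (s.set (j + 2) v).getD k 0 = s.getD k 0 := by simp [List.getD, Ne.symm hki]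
      rw [hne, hp]
      by_cases hpar : k % 2 = j % 2
      · have : (k ≤ j ∧ k % 2 = j % 2) ↔ (k ≤ j + 2 ∧ k % 2 = j % 2) := by omega
        rw [if_congr this rfl rfl]
      · simp [hpar]
  case isFalse h2 =>
    by_cases hki : k = i
    · subst hki
      rw [hgetself, hv, if_pos ⟨le_refl _, rfl⟩]
    · have hne : (s.set i v).getD k 0 = s.getD k 0 := by simp [List.getD, Ne.symm hki]
      rw [hne]
      have : ¬ (k ≤ i ∧ k % 2 = i % 2) := by omega
      simp [this]
termination_by i
decreasing_by omega

lemma searchA_eq_srch (cards csum rsum : List Int)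
    (hc : ∀ k, k < cards.length → csum.getD k 0 = psum cards (k % 2) (k + 1))
    (hr : ∀ k, k < cards.length →
      rsum.getD k 0 = psum cards (k % 2) cards.length - psum cards (k % 2) k)
    (i : Nat) : searchA cards csum rsum i = srch cards i := by
  rw [searchA, srch]
  by_cases h : i < cards.length
  · simp only [h, if_true]
    have e1 : (if 2 ≤ i then csum.getD (i - 2) 0 else 0) = psum cards (i % 2) i := by
      by_cases h2 : 2 ≤ i
      · obtain ⟨j, rfl⟩ : ∃ j, i = j + 2 := ⟨i - 2, by omega⟩
        rw [if_pos h2, show j + 2 - 2 = j from rfl, hc j (by omega)]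
        have hp : (j + 2) % 2 = j % 2 := by omega
        have hne : ¬ ((j + 1) % 2 = (j + 2) % 2) := by omega
        simp [psum, hp]
        omega
      · rw [if_neg h2]
        interval_cases i <;> simp [psum]
    have e2 : (if i + 1 < cards.length then rsum.getD (i + 1) 0 else 0)
        = psum cards ((i + 1) % 2) cards.length - psum cards ((i + 1) % 2) i := by
      have hne : ¬ (i % 2 = (i + 1) % 2) := by omega
      by_cases h2 : i + 1 < cards.length
      · rw [if_pos h2, hr (i + 1) h2]
        simp [psum, hne]
      · rw [if_neg h2]
        have hn : cards.length = i + 1 := by omega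
        rw [hn]
        simp [psum, hne]
    have e3 : (if 1 ≤ i then csum.getD (i - 1) 0 else 0) = psum cards ((i + 1) % 2) i := by
      by_cases h2 : 1 ≤ i
      · obtain ⟨j, rfl⟩ : ∃ j, i = j + 1 := ⟨i - 1, by omega⟩
        rw [if_pos h2, show j + 1 - 1 = j from rfl, hc j (by omega)]
        have hp : j % 2 = (j + 1 + 1) % 2 := by omega
        rw [hp]
      · rw [if_neg h2]
        have : i = 0 := by omega
        subst this
        simp [psum]
    have e4 : (if i + 2 < cards.length then rsum.getD (i + 2) 0 else 0)
        = psum cards (i % 2) cards.length - psum cards (i % 2) i - cards.getD i 0 := by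
      have hp : (i + 2) % 2 = i % 2 := by omega
      have hne : ¬ ((i + 1) % 2 = i % 2) := by omega
      by_cases h2 : i + 2 < cards.length
      · rw [if_pos h2, hr (i + 2) h2, hp]
        simp [psum, hne]
        omega
      · rw [if_neg h2]
        have hn : cards.length = i + 1 ∨ cards.length = i + 2 := by omega
        rcases hn with hn | hn
        · rw [hn]; simp [psum]
        · rw [hn]; simp [psum, hne]
    rw [e1, e2, e3, e4, searchA_eq_srch cards csum rsum hc hr (i + 1)]
  · simp [h]
termination_by cards.length - i
decreasing_by omega

lemma solution_eq_srch (cards : List Int) : solution cards = srch cards 0 := by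
  rw [solution]
  by_cases h1 : cards.length = 1
  · rw [if_pos h1, srch, if_pos (by omega), if_pos (by rw [h1]; simp [psum])]
    norm_num
  · rw [if_neg h1]
    by_cases h0 : cards.length = 0
    · have hnil : cards = [] := List.eq_nil_of_length_eq_zero h0
      subst hnil
      rw [searchA, srch]
      simp
    · -- n ≥ 2
      have hn2 : 2 ≤ cards.length := by omega
      have hc1 := buildFwd_getD cards 0 (List.replicate cards.length 0)
        (by simp) (by intro h; omega)
      have hlen1 : (buildFwd cards (List.replicate cards.length 0) 0).length = cards.length := by
        rw [buildFwd_length]; simp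
      have hc2 := buildFwd_getD cards 1 (buildFwd cards (List.replicate cards.length 0) 0)
        hlen1 (by intro h; omega)
      have hcsum : ∀ k, k < cards.length →
          (buildFwd cards (buildFwd cards (List.replicate cards.length 0) 0) 1).getD k 0
            = psum cards (k % 2) (k + 1) := by
        intro k hk
        rw [hc2 k hk]
        by_cases hp : k % 2 = 0
        · rw [if_neg (by omega), hc1 k hk, if_pos (by omega)]
        · rw [if_pos (by omega)]
      have hr1 := buildBwd_getD cards (cards.length - 1) (List.replicate cards.length 0)
        (by omega) (by simp) (by intro h; omega)
      have hlen2 : (buildBwd cards (List.replicate cards.length 0) (cards.length - 1)).length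
          = cards.length := by rw [buildBwd_length]; simp
      have hr2 := buildBwd_getD cards (cards.length - 2)
        (buildBwd cards (List.replicate cards.length 0) (cards.length - 1))
        (by omega) hlen2 (by intro h; omega)
      have hrsum : ∀ k, k < cards.length →
          (buildBwd cards (buildBwd cards (List.replicate cards.length 0) (cards.length - 1))
              (cards.length - 2)).getD k 0
            = psum cards (k % 2) cards.length - psum cards (k % 2) k := by
        intro k hk
        rw [hr2 k hk]
        by_cases hp : k % 2 = (cards.length - 2) % 2
        · rw [if_pos (by constructor <;> omega)]
        · rw [if_neg (by omega), hr1 k hk, if_pos (by constructor <;> omega)]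
      show searchA cards
          (buildFwd cards (buildFwd cards (List.replicate cards.length 0) 0) 1)
          (if cards.length ≤ 1 then
            (if cards.length = 0 then List.replicate cards.length 0
             else buildBwd cards (List.replicate cards.length 0) (cards.length - 1))
           else buildBwd cards
            (if cards.length = 0 then List.replicate cards.length 0
             else buildBwd cards (List.replicate cards.length 0) (cards.length - 1))
            (cards.length - 2)) 0 = srch cards 0
      rw [if_neg (by omega : ¬ cards.length ≤ 1), if_neg h0]
      exact searchA_eq_srch cards _ _ hcsum hrsum 0

lemma bTotals_spec (cards : List Int) (i : Nat) (hi : i ≤ cards.length) :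
    bTotals (cards.drop i) i (psum cards 0 i, psum cards 1 i)
      = (psum cards 0 cards.length, psum cards 1 cards.length) := by
  by_cases h : i < cards.length
  · rw [List.drop_eq_getElem_cons h, bTotals]
    have hg : cards[i] = cards.getD i 0 := (List.getD_eq_getElem cards 0 h).symm
    have hstep : (if i % 2 = 0 then (psum cards 0 i + cards[i], psum cards 1 i)
        else (psum cards 0 i, psum cards 1 i + cards[i]))
        = (psum cards 0 (i + 1), psum cards 1 (i + 1)) := by
      by_cases hp : i % 2 = 0
      · have hp1 : ¬ (i % 2 = 1) := by omega
        simp [hp, psum, hg]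
      · have hp1 : i % 2 = 1 := by omega
        simp [hp, psum, hg]
    rw [hstep, bTotals_spec cards (i + 1) (by omega)]
  · have : i = cards.length := by omega
    subst this
    simp [bTotals]
termination_by cards.length - i
decreasing_by all_goals omega

lemma bLoop_eq_srch (cards : List Int) (i : Nat) (hi : i ≤ cards.length) :
    bLoop (psum cards 0 cards.length, psum cards 1 cards.length)
      (cards.drop i) i (psum cards 0 i, psum cards 1 i) = srch cards i := by
  rw [srch]
  by_cases h : i < cards.length
  · rw [List.drop_eq_getElem_cons h, bLoop, if_pos h]
    have hg : cards[i] = cards.getD i 0 := (List.getD_eq_getElem cards 0 h).symm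
    by_cases hp : i % 2 = 0
    · have hp1 : (i + 1) % 2 = 1 := by omega
      rw [if_pos hp]
      have hcond : (psum cards 0 i + (psum cards 1 cards.length - psum cards 1 i)
            = psum cards 1 i + (psum cards 0 cards.length - psum cards 0 i - cards[i]))
          ↔ (psum cards (i % 2) i
              + (psum cards ((i + 1) % 2) cards.length - psum cards ((i + 1) % 2) i)
            = psum cards ((i + 1) % 2) i
              + (psum cards (i % 2) cards.length - psum cards (i % 2) i - cards.getD i 0)) := by
        rw [hp, hp1, hg]
      rw [if_congr hcond rfl rfl]
      split
      · rfl
      · have hstep : (psum cards 0 i + cards[i], psum cards 1 i)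
            = (psum cards 0 (i + 1), psum cards 1 (i + 1)) := by
          have hp1' : ¬ (i % 2 = 1) := by omega
          simp [psum, hp, hg]
        rw [hstep, bLoop_eq_srch cards (i + 1) (by omega)]
    · have hp1 : (i + 1) % 2 = 0 := by omega
      have hp' : i % 2 = 1 := by omega
      rw [if_neg hp]
      have hcond : (psum cards 1 i + (psum cards 0 cards.length - psum cards 0 i)
            = psum cards 0 i + (psum cards 1 cards.length - psum cards 1 i - cards[i]))
          ↔ (psum cards (i % 2) i
              + (psum cards ((i + 1) % 2) cards.length - psum cards ((i + 1) % 2) i)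
            = psum cards ((i + 1) % 2) i
              + (psum cards (i % 2) cards.length - psum cards (i % 2) i - cards.getD i 0)) := by
        rw [hp', hp1, hg]
      rw [if_congr hcond rfl rfl]
      split
      · rfl
      · have hstep : (psum cards 0 i, psum cards 1 i + cards[i])
            = (psum cards 0 (i + 1), psum cards 1 (i + 1)) := by
          simp [psum, hp', hg]
        rw [hstep, bLoop_eq_srch cards (i + 1) (by omega)]
  · have : i = cards.length := by omega
    subst this
    simp [bLoop]
termination_by cards.length - i
decreasing_by all_goals omega

lemma solution_alt_eq_srch (cards : List Int) : solution_alt cards = srch cards 0 := by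
  have h0 : bTotals cards 0 (0, 0) = (psum cards 0 cards.length, psum cards 1 cards.length) := by
    have := bTotals_spec cards 0 (by omega)
    simpa [psum] using this
  rw [solution_alt, h0]
  have := bLoop_eq_srch cards 0 (by omega)
  simpa [psum] using this

-- ===== VERDICT (by name: the statement is the Claim_ definition above) =====
theorem solution_spec : Claim_equal_solution := by
  intro cards _
  unfold Spec_solution
  rw [solution_eq_srch, solution_alt_eq_srch]
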